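-- pv_equiv track=rewrite | github.com/BoweryJG/crm | scripts/enrich_contacts_clean.py | determine_territory
-- ===== SOURCE A (Python) =====
-- def determine_territory(state):
--     """Assign sales territory based on state"""
--     territories = {
--         'Northeast': ['NY', 'NJ', 'CT', 'MA', 'PA', 'ME', 'NH', 'VT', 'RI'],
--         'Southeast': ['FL', 'GA', 'NC', 'SC', 'VA', 'TN', 'AL', 'MS', 'KY', 'WV', 'MD', 'DE', 'DC'],
--         'Midwest': ['IL', 'OH', 'MI', 'IN', 'WI', 'MN', 'IA', 'MO', 'ND', 'SD', 'NE', 'KS'],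
--         'Southwest': ['TX', 'OK', 'AR', 'LA', 'NM', 'AZ'],
--         'West': ['CA', 'WA', 'OR', 'NV', 'UT', 'CO', 'ID', 'MT', 'WY'],
--         'Other': ['AK', 'HI']
--     }
--
--     state_abbr = state.strip().upper()[:2]
--
--     for territory, states in territories.items():
--         if state_abbr in states:
--             return territory
--
--     return 'Other'
-- ===== SOURCE B (Python) =====
-- def determine_territory(state):
--     """Assign sales territory based on state"""
--     s = state.strip().upper()[:2]
--     if len(s) != 2:
--         return 'Other'
--     c0, c1 = s[0], s[1]
--     if c0 == 'A':
--         if c1 == 'L':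
--             return 'Southeast'
--         elif c1 == 'R':
--             return 'Southwest'
--         elif c1 == 'Z':
--             return 'Southwest'
--     elif c0 == 'C':
--         if c1 == 'T':
--             return 'Northeast'
--         elif c1 == 'A':
--             return 'West'
--         elif c1 == 'O':
--             return 'West'
--     elif c0 == 'D':
--         if c1 == 'E':
--             return 'Southeast'
--         elif c1 == 'C':
--             return 'Southeast'
--     elif c0 == 'F':
--         if c1 == 'L':
--             return 'Southeast'
--     elif c0 == 'G':
--         if c1 == 'A':
--             return 'Southeast'
--     elif c0 == 'I':
--         if c1 == 'L':
--             return 'Midwest'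
--         elif c1 == 'N':
--             return 'Midwest'
--         elif c1 == 'A':
--             return 'Midwest'
--         elif c1 == 'D':
--             return 'West'
--     elif c0 == 'K':
--         if c1 == 'Y':
--             return 'Southeast'
--         elif c1 == 'S':
--             return 'Midwest'
--     elif c0 == 'L':
--         if c1 == 'A':
--             return 'Southwest'
--     elif c0 == 'M':
--         if c1 == 'A':
--             return 'Northeast'
--         elif c1 == 'E':
--             return 'Northeast'
--         elif c1 == 'S':
--             return 'Southeast'
--         elif c1 == 'D':
--             return 'Southeast'
--         elif c1 == 'I':
--             return 'Midwest'
--         elif c1 == 'N':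
--             return 'Midwest'
--         elif c1 == 'O':
--             return 'Midwest'
--         elif c1 == 'T':
--             return 'West'
--     elif c0 == 'N':
--         if c1 == 'Y':
--             return 'Northeast'
--         elif c1 == 'J':
--             return 'Northeast'
--         elif c1 == 'H':
--             return 'Northeast'
--         elif c1 == 'C':
--             return 'Southeast'
--         elif c1 == 'D':
--             return 'Midwest'
--         elif c1 == 'E':
--             return 'Midwest'
--         elif c1 == 'M':
--             return 'Southwest'
--         elif c1 == 'V':
--             return 'West'
--     elif c0 == 'O':
--         if c1 == 'H':
--             return 'Midwest'
--         elif c1 == 'K':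
--             return 'Southwest'
--         elif c1 == 'R':
--             return 'West'
--     elif c0 == 'P':
--         if c1 == 'A':
--             return 'Northeast'
--     elif c0 == 'R':
--         if c1 == 'I':
--             return 'Northeast'
--     elif c0 == 'S':
--         if c1 == 'C':
--             return 'Southeast'
--         elif c1 == 'D':
--             return 'Midwest'
--     elif c0 == 'T':
--         if c1 == 'N':
--             return 'Southeast'
--         elif c1 == 'X':
--             return 'Southwest'
--     elif c0 == 'U':
--         if c1 == 'T':
--             return 'West'
--     elif c0 == 'V':
--         if c1 == 'T':
--             return 'Northeast'
--         elif c1 == 'A':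
--             return 'Southeast'
--     elif c0 == 'W':
--         if c1 == 'V':
--             return 'Southeast'
--         elif c1 == 'I':
--             return 'Midwest'
--         elif c1 == 'A':
--             return 'West'
--         elif c1 == 'Y':
--             return 'West'
--     return 'Other'
-- ===== Notes on version B (the rewrite author's own statement) =====
-- stated objective: alternative
-- what changed: Replaces A's scan over six territory lists with membership tests by a two-level character decision tree: after the same normalization, branch on the first letter of the abbreviation, then on the second, falling through to the default territory.
import Mathlib
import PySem

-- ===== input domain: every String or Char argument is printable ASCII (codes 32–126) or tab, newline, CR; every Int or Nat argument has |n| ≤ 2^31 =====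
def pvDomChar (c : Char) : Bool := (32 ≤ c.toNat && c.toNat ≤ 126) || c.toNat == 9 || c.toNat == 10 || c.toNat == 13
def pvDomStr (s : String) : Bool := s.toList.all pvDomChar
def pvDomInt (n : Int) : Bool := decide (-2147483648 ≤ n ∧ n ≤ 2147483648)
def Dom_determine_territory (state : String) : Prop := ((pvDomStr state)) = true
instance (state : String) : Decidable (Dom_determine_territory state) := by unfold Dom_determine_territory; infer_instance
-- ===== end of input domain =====

-- B replaces A's scan over per-territory membership lists by a hand-written two-level
-- character decision tree (branch on the first letter, then the second).

-- ===== PORT A =====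
-- A's territories dict, an insertion-ordered association list
def territoriesA : List (String × List String) :=
  [("Northeast", ["NY", "NJ", "CT", "MA", "PA", "ME", "NH", "VT", "RI"]),
   ("Southeast", ["FL", "GA", "NC", "SC", "VA", "TN", "AL", "MS", "KY", "WV", "MD", "DE", "DC"]),
   ("Midwest", ["IL", "OH", "MI", "IN", "WI", "MN", "IA", "MO", "ND", "SD", "NE", "KS"]),
   ("Southwest", ["TX", "OK", "AR", "LA", "NM", "AZ"]),
   ("West", ["CA", "WA", "OR", "NV", "UT", "CO", "ID", "MT", "WY"]),
   ("Other", ["AK", "HI"])]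

-- A's 'for territory, states in territories.items(): if state_abbr in states: return territory'
def firstTerritory : List (String × List String) → String → String
  | [], _ => "Other"
  | (t, ss) :: rest, x => if ss.contains x then t else firstTerritory rest x

def determine_territory (state : String) : String :=
  firstTerritory territoriesA (PySem.Str.slice (PySem.Str.upper (PySem.Str.strip state)) none (some 2))

-- ===== PORT B =====
-- Source B's if/elif chain on the first letter; each inner elif chain on the second letter is a helper
def lookA (c1 : Char) : String := if c1 = 'L' then "Southeast" else if c1 = 'R' then "Southwest" else if c1 = 'Z' then "Southwest" else "Other"
def lookC (c1 : Char) : String := if c1 = 'T' then "Northeast" else if c1 = 'A' then "West" else if c1 = 'O' then "West" else "Other"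
def lookD (c1 : Char) : String := if c1 = 'E' then "Southeast" else if c1 = 'C' then "Southeast" else "Other"
def lookF (c1 : Char) : String := if c1 = 'L' then "Southeast" else "Other"
def lookG (c1 : Char) : String := if c1 = 'A' then "Southeast" else "Other"
def lookI (c1 : Char) : String := if c1 = 'L' then "Midwest" else if c1 = 'N' then "Midwest" else if c1 = 'A' then "Midwest" else if c1 = 'D' then "West" else "Other"
def lookK (c1 : Char) : String := if c1 = 'Y' then "Southeast" else if c1 = 'S' then "Midwest" else "Other"
def lookL (c1 : Char) : String := if c1 = 'A' then "Southwest" else "Other"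
def lookM (c1 : Char) : String := if c1 = 'A' then "Northeast" else if c1 = 'E' then "Northeast" else if c1 = 'S' then "Southeast" else if c1 = 'D' then "Southeast" else if c1 = 'I' then "Midwest" else if c1 = 'N' then "Midwest" else if c1 = 'O' then "Midwest" else if c1 = 'T' then "West" else "Other"
def lookN (c1 : Char) : String := if c1 = 'Y' then "Northeast" else if c1 = 'J' then "Northeast" else if c1 = 'H' then "Northeast" else if c1 = 'C' then "Southeast" else if c1 = 'D' then "Midwest" else if c1 = 'E' then "Midwest" else if c1 = 'M' then "Southwest" else if c1 = 'V' then "West" else "Other"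
def lookO (c1 : Char) : String := if c1 = 'H' then "Midwest" else if c1 = 'K' then "Southwest" else if c1 = 'R' then "West" else "Other"
def lookP (c1 : Char) : String := if c1 = 'A' then "Northeast" else "Other"
def lookR (c1 : Char) : String := if c1 = 'I' then "Northeast" else "Other"
def lookS (c1 : Char) : String := if c1 = 'C' then "Southeast" else if c1 = 'D' then "Midwest" else "Other"
def lookT (c1 : Char) : String := if c1 = 'N' then "Southeast" else if c1 = 'X' then "Southwest" else "Other"
def lookU (c1 : Char) : String := if c1 = 'T' then "West" else "Other"
def lookV (c1 : Char) : String := if c1 = 'T' then "Northeast" else if c1 = 'A' then "Southeast" else "Other"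
def lookW (c1 : Char) : String := if c1 = 'V' then "Southeast" else if c1 = 'I' then "Midwest" else if c1 = 'A' then "West" else if c1 = 'Y' then "West" else "Other"

def treeLookup (c0 c1 : Char) : String :=
  if c0 = 'A' then lookA c1 else
  if c0 = 'C' then lookC c1 else
  if c0 = 'D' then lookD c1 else
  if c0 = 'F' then lookF c1 else
  if c0 = 'G' then lookG c1 else
  if c0 = 'I' then lookI c1 else
  if c0 = 'K' then lookK c1 else
  if c0 = 'L' then lookL c1 else
  if c0 = 'M' then lookM c1 else
  if c0 = 'N' then lookN c1 else
  if c0 = 'O' then lookO c1 else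
  if c0 = 'P' then lookP c1 else
  if c0 = 'R' then lookR c1 else
  if c0 = 'S' then lookS c1 else
  if c0 = 'T' then lookT c1 else
  if c0 = 'U' then lookU c1 else
  if c0 = 'V' then lookV c1 else
  if c0 = 'W' then lookW c1 else
  "Other"

-- Source B's 'if len(s) != 2: return "Other"' then 'c0, c1 = s[0], s[1]'
def pickTwoL : List Char → String
  | [c0, c1] => treeLookup c0 c1
  | _ => "Other"

def pickTwo (s : String) : String := pickTwoL s.toList

def determine_territory_alt (state : String) : String :=
  pickTwo (PySem.Str.slice (PySem.Str.upper (PySem.Str.strip state)) none (some 2))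

-- ===== PRECONDITION & SPEC =====
def Spec_determine_territory (state : String) (out : String) : Prop := out = determine_territory_alt state
instance (state : String) (out : String) : Decidable (Spec_determine_territory state out) := by unfold Spec_determine_territory; infer_instance

-- ===== CLAIM =====
def Claim_equal_determine_territory : Prop := ∀ (state : String), Dom_determine_territory state → Spec_determine_territory state (determine_territory state)

-- ===== LEMMAS AND PROOFS =====
-- the 59 state codes A's scan can hit, in scan order
def allCodes : List String := territoriesA.flatMap (·.2)

theorem firstTerritory_other (gs : List (String × List String)) (x : String)
    (h : ∀ p ∈ gs, x ∉ p.2) : firstTerritory gs x = "Other" := by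
  induction gs with
  | nil => rfl
  | cons g rest ih =>
      obtain ⟨t, ss⟩ := g
      have hx : x ∉ ss := h (t, ss) (List.mem_cons_self ..)
      simp only [firstTerritory, List.contains_eq_mem, hx, decide_false]
      exact ih fun p hp => h p (List.mem_cons_of_mem _ hp)

-- A's scan and B's decision tree agree on every string
theorem key (x : String) : firstTerritory territoriesA x = pickTwo x := by
  by_cases h : x ∈ allCodes
  · rw [show allCodes = ["NY", "NJ", "CT", "MA", "PA", "ME", "NH", "VT", "RI", "FL", "GA", "NC", "SC", "VA", "TN", "AL", "MS", "KY", "WV", "MD", "DE", "DC", "IL", "OH", "MI", "IN", "WI", "MN", "IA", "MO", "ND", "SD", "NE", "KS", "TX", "OK", "AR", "LA", "NM", "AZ", "CA", "WA", "OR", "NV", "UT", "CO", "ID", "MT", "WY", "AK", "HI"] from rfl] at h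
    repeat (rcases List.mem_cons.mp h with rfl | h <;> [decide; skip])
    exact absurd h (List.not_mem_nil)
  · have hA : firstTerritory territoriesA x = "Other" :=
      firstTerritory_other _ _ fun p hp hm => h (List.mem_flatMap.mpr ⟨p, hp, hm⟩)
    rw [hA]
    unfold pickTwo
    rcases hl : x.toList with _ | ⟨c0, _ | ⟨c1, _ | ⟨c2, rest⟩⟩⟩ <;>
      [rfl; rfl; skip; rfl]
    show "Other" = treeLookup c0 c1
    unfold treeLookup
    by_cases hA : c0 = 'A'
    · rw [if_pos hA]
      unfold lookA
      by_cases hAL : c1 = 'L'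
      · rw [if_pos hAL]
        exact absurd (by
            have hx : x = String.ofList x.toList := String.ofList_toList.symm
            rw [hx, hl, hA, hAL]; decide) h
      rw [if_neg hAL]
      by_cases hAR : c1 = 'R'
      · rw [if_pos hAR]
        exact absurd (by
            have hx : x = String.ofList x.toList := String.ofList_toList.symm
            rw [hx, hl, hA, hAR]; decide) h
      rw [if_neg hAR]
      by_cases hAZ : c1 = 'Z'
      · rw [if_pos hAZ]
        exact absurd (by
            have hx : x = String.ofList x.toList := String.ofList_toList.symm
            rw [hx, hl, hA, hAZ]; decide) h
      rw [if_neg hAZ]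
    rw [if_neg hA]
    by_cases hC : c0 = 'C'
    · rw [if_pos hC]
      unfold lookC
      by_cases hCT : c1 = 'T'
      · rw [if_pos hCT]
        exact absurd (by
            have hx : x = String.ofList x.toList := String.ofList_toList.symm
            rw [hx, hl, hC, hCT]; decide) h
      rw [if_neg hCT]
      by_cases hCA : c1 = 'A'
      · rw [if_pos hCA]
        exact absurd (by
            have hx : x = String.ofList x.toList := String.ofList_toList.symm
            rw [hx, hl, hC, hCA]; decide) h
      rw [if_neg hCA]
      by_cases hCO : c1 = 'O'
      · rw [if_pos hCO]
        exact absurd (by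
            have hx : x = String.ofList x.toList := String.ofList_toList.symm
            rw [hx, hl, hC, hCO]; decide) h
      rw [if_neg hCO]
    rw [if_neg hC]
    by_cases hD : c0 = 'D'
    · rw [if_pos hD]
      unfold lookD
      by_cases hDE : c1 = 'E'
      · rw [if_pos hDE]
        exact absurd (by
            have hx : x = String.ofList x.toList := String.ofList_toList.symm
            rw [hx, hl, hD, hDE]; decide) h
      rw [if_neg hDE]
      by_cases hDC : c1 = 'C'
      · rw [if_pos hDC]
        exact absurd (by
            have hx : x = String.ofList x.toList := String.ofList_toList.symm
            rw [hx, hl, hD, hDC]; decide) h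
      rw [if_neg hDC]
    rw [if_neg hD]
    by_cases hF : c0 = 'F'
    · rw [if_pos hF]
      unfold lookF
      by_cases hFL : c1 = 'L'
      · rw [if_pos hFL]
        exact absurd (by
            have hx : x = String.ofList x.toList := String.ofList_toList.symm
            rw [hx, hl, hF, hFL]; decide) h
      rw [if_neg hFL]
    rw [if_neg hF]
    by_cases hG : c0 = 'G'
    · rw [if_pos hG]
      unfold lookG
      by_cases hGA : c1 = 'A'
      · rw [if_pos hGA]
        exact absurd (by
            have hx : x = String.ofList x.toList := String.ofList_toList.symm
            rw [hx, hl, hG, hGA]; decide) h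
      rw [if_neg hGA]
    rw [if_neg hG]
    by_cases hI : c0 = 'I'
    · rw [if_pos hI]
      unfold lookI
      by_cases hIL : c1 = 'L'
      · rw [if_pos hIL]
        exact absurd (by
            have hx : x = String.ofList x.toList := String.ofList_toList.symm
            rw [hx, hl, hI, hIL]; decide) h
      rw [if_neg hIL]
      by_cases hIN : c1 = 'N'
      · rw [if_pos hIN]
        exact absurd (by
            have hx : x = String.ofList x.toList := String.ofList_toList.symm
            rw [hx, hl, hI, hIN]; decide) h
      rw [if_neg hIN]
      by_cases hIA : c1 = 'A'
      · rw [if_pos hIA]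
        exact absurd (by
            have hx : x = String.ofList x.toList := String.ofList_toList.symm
            rw [hx, hl, hI, hIA]; decide) h
      rw [if_neg hIA]
      by_cases hID : c1 = 'D'
      · rw [if_pos hID]
        exact absurd (by
            have hx : x = String.ofList x.toList := String.ofList_toList.symm
            rw [hx, hl, hI, hID]; decide) h
      rw [if_neg hID]
    rw [if_neg hI]
    by_cases hK : c0 = 'K'
    · rw [if_pos hK]
      unfold lookK
      by_cases hKY : c1 = 'Y'
      · rw [if_pos hKY]
        exact absurd (by
            have hx : x = String.ofList x.toList := String.ofList_toList.symm
            rw [hx, hl, hK, hKY]; decide) h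
      rw [if_neg hKY]
      by_cases hKS : c1 = 'S'
      · rw [if_pos hKS]
        exact absurd (by
            have hx : x = String.ofList x.toList := String.ofList_toList.symm
            rw [hx, hl, hK, hKS]; decide) h
      rw [if_neg hKS]
    rw [if_neg hK]
    by_cases hL : c0 = 'L'
    · rw [if_pos hL]
      unfold lookL
      by_cases hLA : c1 = 'A'
      · rw [if_pos hLA]
        exact absurd (by
            have hx : x = String.ofList x.toList := String.ofList_toList.symm
            rw [hx, hl, hL, hLA]; decide) h
      rw [if_neg hLA]
    rw [if_neg hL]
    by_cases hM : c0 = 'M'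
    · rw [if_pos hM]
      unfold lookM
      by_cases hMA : c1 = 'A'
      · rw [if_pos hMA]
        exact absurd (by
            have hx : x = String.ofList x.toList := String.ofList_toList.symm
            rw [hx, hl, hM, hMA]; decide) h
      rw [if_neg hMA]
      by_cases hME : c1 = 'E'
      · rw [if_pos hME]
        exact absurd (by
            have hx : x = String.ofList x.toList := String.ofList_toList.symm
            rw [hx, hl, hM, hME]; decide) h
      rw [if_neg hME]
      by_cases hMS : c1 = 'S'
      · rw [if_pos hMS]
        exact absurd (by
            have hx : x = String.ofList x.toList := String.ofList_toList.symm
            rw [hx, hl, hM, hMS]; decide) h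
      rw [if_neg hMS]
      by_cases hMD : c1 = 'D'
      · rw [if_pos hMD]
        exact absurd (by
            have hx : x = String.ofList x.toList := String.ofList_toList.symm
            rw [hx, hl, hM, hMD]; decide) h
      rw [if_neg hMD]
      by_cases hMI : c1 = 'I'
      · rw [if_pos hMI]
        exact absurd (by
            have hx : x = String.ofList x.toList := String.ofList_toList.symm
            rw [hx, hl, hM, hMI]; decide) h
      rw [if_neg hMI]
      by_cases hMN : c1 = 'N'
      · rw [if_pos hMN]
        exact absurd (by
            have hx : x = String.ofList x.toList := String.ofList_toList.symm
            rw [hx, hl, hM, hMN]; decide) h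
      rw [if_neg hMN]
      by_cases hMO : c1 = 'O'
      · rw [if_pos hMO]
        exact absurd (by
            have hx : x = String.ofList x.toList := String.ofList_toList.symm
            rw [hx, hl, hM, hMO]; decide) h
      rw [if_neg hMO]
      by_cases hMT : c1 = 'T'
      · rw [if_pos hMT]
        exact absurd (by
            have hx : x = String.ofList x.toList := String.ofList_toList.symm
            rw [hx, hl, hM, hMT]; decide) h
      rw [if_neg hMT]
    rw [if_neg hM]
    by_cases hN : c0 = 'N'
    · rw [if_pos hN]
      unfold lookN
      by_cases hNY : c1 = 'Y'
      · rw [if_pos hNY]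
        exact absurd (by
            have hx : x = String.ofList x.toList := String.ofList_toList.symm
            rw [hx, hl, hN, hNY]; decide) h
      rw [if_neg hNY]
      by_cases hNJ : c1 = 'J'
      · rw [if_pos hNJ]
        exact absurd (by
            have hx : x = String.ofList x.toList := String.ofList_toList.symm
            rw [hx, hl, hN, hNJ]; decide) h
      rw [if_neg hNJ]
      by_cases hNH : c1 = 'H'
      · rw [if_pos hNH]
        exact absurd (by
            have hx : x = String.ofList x.toList := String.ofList_toList.symm
            rw [hx, hl, hN, hNH]; decide) h
      rw [if_neg hNH]
      by_cases hNC : c1 = 'C'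
      · rw [if_pos hNC]
        exact absurd (by
            have hx : x = String.ofList x.toList := String.ofList_toList.symm
            rw [hx, hl, hN, hNC]; decide) h
      rw [if_neg hNC]
      by_cases hND : c1 = 'D'
      · rw [if_pos hND]
        exact absurd (by
            have hx : x = String.ofList x.toList := String.ofList_toList.symm
            rw [hx, hl, hN, hND]; decide) h
      rw [if_neg hND]
      by_cases hNE : c1 = 'E'
      · rw [if_pos hNE]
        exact absurd (by
            have hx : x = String.ofList x.toList := String.ofList_toList.symm
            rw [hx, hl, hN, hNE]; decide) h
      rw [if_neg hNE]
      by_cases hNM : c1 = 'M'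
      · rw [if_pos hNM]
        exact absurd (by
            have hx : x = String.ofList x.toList := String.ofList_toList.symm
            rw [hx, hl, hN, hNM]; decide) h
      rw [if_neg hNM]
      by_cases hNV : c1 = 'V'
      · rw [if_pos hNV]
        exact absurd (by
            have hx : x = String.ofList x.toList := String.ofList_toList.symm
            rw [hx, hl, hN, hNV]; decide) h
      rw [if_neg hNV]
    rw [if_neg hN]
    by_cases hO : c0 = 'O'
    · rw [if_pos hO]
      unfold lookO
      by_cases hOH : c1 = 'H'
      · rw [if_pos hOH]
        exact absurd (by
            have hx : x = String.ofList x.toList := String.ofList_toList.symm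
            rw [hx, hl, hO, hOH]; decide) h
      rw [if_neg hOH]
      by_cases hOK : c1 = 'K'
      · rw [if_pos hOK]
        exact absurd (by
            have hx : x = String.ofList x.toList := String.ofList_toList.symm
            rw [hx, hl, hO, hOK]; decide) h
      rw [if_neg hOK]
      by_cases hOR : c1 = 'R'
      · rw [if_pos hOR]
        exact absurd (by
            have hx : x = String.ofList x.toList := String.ofList_toList.symm
            rw [hx, hl, hO, hOR]; decide) h
      rw [if_neg hOR]
    rw [if_neg hO]
    by_cases hP : c0 = 'P'
    · rw [if_pos hP]
      unfold lookP
      by_cases hPA : c1 = 'A'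
      · rw [if_pos hPA]
        exact absurd (by
            have hx : x = String.ofList x.toList := String.ofList_toList.symm
            rw [hx, hl, hP, hPA]; decide) h
      rw [if_neg hPA]
    rw [if_neg hP]
    by_cases hR : c0 = 'R'
    · rw [if_pos hR]
      unfold lookR
      by_cases hRI : c1 = 'I'
      · rw [if_pos hRI]
        exact absurd (by
            have hx : x = String.ofList x.toList := String.ofList_toList.symm
            rw [hx, hl, hR, hRI]; decide) h
      rw [if_neg hRI]
    rw [if_neg hR]
    by_cases hS : c0 = 'S'
    · rw [if_pos hS]
      unfold lookS
      by_cases hSC : c1 = 'C'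
      · rw [if_pos hSC]
        exact absurd (by
            have hx : x = String.ofList x.toList := String.ofList_toList.symm
            rw [hx, hl, hS, hSC]; decide) h
      rw [if_neg hSC]
      by_cases hSD : c1 = 'D'
      · rw [if_pos hSD]
        exact absurd (by
            have hx : x = String.ofList x.toList := String.ofList_toList.symm
            rw [hx, hl, hS, hSD]; decide) h
      rw [if_neg hSD]
    rw [if_neg hS]
    by_cases hT : c0 = 'T'
    · rw [if_pos hT]
      unfold lookT
      by_cases hTN : c1 = 'N'
      · rw [if_pos hTN]
        exact absurd (by
            have hx : x = String.ofList x.toList := String.ofList_toList.symm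
            rw [hx, hl, hT, hTN]; decide) h
      rw [if_neg hTN]
      by_cases hTX : c1 = 'X'
      · rw [if_pos hTX]
        exact absurd (by
            have hx : x = String.ofList x.toList := String.ofList_toList.symm
            rw [hx, hl, hT, hTX]; decide) h
      rw [if_neg hTX]
    rw [if_neg hT]
    by_cases hU : c0 = 'U'
    · rw [if_pos hU]
      unfold lookU
      by_cases hUT : c1 = 'T'
      · rw [if_pos hUT]
        exact absurd (by
            have hx : x = String.ofList x.toList := String.ofList_toList.symm
            rw [hx, hl, hU, hUT]; decide) h
      rw [if_neg hUT]
    rw [if_neg hU]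
    by_cases hV : c0 = 'V'
    · rw [if_pos hV]
      unfold lookV
      by_cases hVT : c1 = 'T'
      · rw [if_pos hVT]
        exact absurd (by
            have hx : x = String.ofList x.toList := String.ofList_toList.symm
            rw [hx, hl, hV, hVT]; decide) h
      rw [if_neg hVT]
      by_cases hVA : c1 = 'A'
      · rw [if_pos hVA]
        exact absurd (by
            have hx : x = String.ofList x.toList := String.ofList_toList.symm
            rw [hx, hl, hV, hVA]; decide) h
      rw [if_neg hVA]
    rw [if_neg hV]
    by_cases hW : c0 = 'W'
    · rw [if_pos hW]
      unfold lookW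
      by_cases hWV : c1 = 'V'
      · rw [if_pos hWV]
        exact absurd (by
            have hx : x = String.ofList x.toList := String.ofList_toList.symm
            rw [hx, hl, hW, hWV]; decide) h
      rw [if_neg hWV]
      by_cases hWI : c1 = 'I'
      · rw [if_pos hWI]
        exact absurd (by
            have hx : x = String.ofList x.toList := String.ofList_toList.symm
            rw [hx, hl, hW, hWI]; decide) h
      rw [if_neg hWI]
      by_cases hWA : c1 = 'A'
      · rw [if_pos hWA]
        exact absurd (by
            have hx : x = String.ofList x.toList := String.ofList_toList.symm
            rw [hx, hl, hW, hWA]; decide) h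
      rw [if_neg hWA]
      by_cases hWY : c1 = 'Y'
      · rw [if_pos hWY]
        exact absurd (by
            have hx : x = String.ofList x.toList := String.ofList_toList.symm
            rw [hx, hl, hW, hWY]; decide) h
      rw [if_neg hWY]
    rw [if_neg hW]

-- ===== VERDICT =====
theorem determine_territory_spec : Claim_equal_determine_territory := by
  intro state _
  unfold Spec_determine_territory determine_territory determine_territory_alt
  exact key _
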